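-- pv_equiv track=rewrite | github.com/bashatahamal/test | complete_flow.py | get_marker_name
-- ===== SOURCE A (Python) =====
-- def get_marker_name(key):
--     part = key.split('_')
--     name = []
--     for x in range(len(part)):
--         if x == 0:
--             continue
--         if x == len(part) - 1:
--             name.append(part[x])
--         else:
--             name.append(part[x] + '_')
--     name = ''.join(name)
--
--     return name
-- ===== SOURCE B (Python) =====
-- def get_marker_name(key):
--     i = key.find('_')
--     if i == -1:
--         return ''
--     return key[i + 1:]
-- ===== Notes on version B (the rewrite author's own statement) =====
-- stated objective: simpler
-- what changed: Instead of splitting the key into all underscore-separated parts and rejoining every part after the first with manually re-inserted separators, B locates the first underscore with find and returns a single tail slice (empty string when there is no underscore).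
import Mathlib
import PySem

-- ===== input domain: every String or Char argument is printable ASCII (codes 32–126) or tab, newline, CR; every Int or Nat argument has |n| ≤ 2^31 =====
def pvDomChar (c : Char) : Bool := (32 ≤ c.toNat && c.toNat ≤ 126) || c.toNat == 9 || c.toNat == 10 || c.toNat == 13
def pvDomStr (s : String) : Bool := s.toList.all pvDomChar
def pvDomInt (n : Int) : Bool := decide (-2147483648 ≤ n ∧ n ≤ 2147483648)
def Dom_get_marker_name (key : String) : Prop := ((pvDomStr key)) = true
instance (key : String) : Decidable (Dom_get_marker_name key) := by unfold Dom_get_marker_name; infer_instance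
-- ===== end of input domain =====

-- B replaces split-all-parts-then-rejoin by find-first-underscore-then-one-slice: simpler, same behaviour.


-- ===== PORT A =====
def get_marker_name (key : String) : String :=
  let part : List String := (PySem.Str.split? key "_").getD []   -- sep "_" ≠ "", so split? is always `some`
  let name : List String :=
    (PySem.List.pyRange 0 (part.length : Int) 1).foldl
      (fun name x =>
        if x = 0 then name
        else if x = (part.length : Int) - 1 then name ++ [PySem.List.pyGetD part x ""]
        else name ++ [PySem.List.pyGetD part x "" ++ "_"]) []
  PySem.Str.join "" name

-- ===== PORT B =====
def get_marker_name_alt (key : String) : String :=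
  let i := PySem.Str.find key "_"
  if i = -1 then "" else PySem.Str.slice key (some (i + 1)) none

-- ===== PRECONDITION & SPEC =====
def Spec_get_marker_name (key : String) (out : String) : Prop := out = get_marker_name_alt key
instance (key : String) (out : String) : Decidable (Spec_get_marker_name key out) := by unfold Spec_get_marker_name; infer_instance

-- ===== CLAIM (what is proved, stated in full; the proofs are below) =====
def Claim_equal_get_marker_name : Prop := ∀ (key : String), Dom_get_marker_name key → Spec_get_marker_name key (get_marker_name key)

-- ===== LEMMAS AND PROOFS =====

def pvSp : List Char → List (List Char)
  | [] => [[]]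
  | c :: r => if c = '_' then [] :: pvSp r else (pvSp r).modifyHead (c :: ·)

theorem pvSp_ne_nil (cs : List Char) : pvSp cs ≠ [] := by
  induction cs with
  | nil => simp [pvSp]
  | cons c r ih =>
    simp only [pvSp]
    split
    · simp
    · intro h; exact ih (by simpa using congrArg List.length h)

theorem pv_modifyHead_fun_id {α : Type} (l : List α) : l.modifyHead (fun x => x) = l := by
  cases l <;> simp

theorem pv_go_eq (fuel : Nat) : ∀ (l cur : List Char),
    ∀ (_ : l.length < fuel) (accs : List (List Char)),
    PySem.Chars.splitOn.go ['_'] fuel l cur accs = accs.reverse ++ (pvSp l).modifyHead (cur.reverse ++ ·) := by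
  induction fuel with
  | zero => intro l cur h; omega
  | succ f ih =>
    intro l cur h accs
    cases l with
    | nil => simp [PySem.Chars.splitOn.go, pvSp]
    | cons c rest =>
      by_cases hc : c = '_'
      · subst hc
        have hp : List.isPrefixOf ['_'] ('_' :: rest) = true := by simp [List.isPrefixOf]
        rw [PySem.Chars.splitOn.go]
        simp only [hp, if_true, List.length_cons, List.drop_succ_cons, List.length_nil, List.drop_zero]
        rw [ih rest [] (by simpa using Nat.lt_of_succ_lt_succ h)]
        simp [pvSp, pv_modifyHead_fun_id]
      · have hp : List.isPrefixOf ['_'] (c :: rest) = false := by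
          simp [List.isPrefixOf]; exact fun h => hc h.symm
        rw [PySem.Chars.splitOn.go]
        simp only [hp]
        rw [ih rest (c :: cur) (by simpa using Nat.lt_of_succ_lt_succ h)]
        simp only [pvSp, if_neg hc]
        cases hsp : pvSp rest with
        | nil => rfl
        | cons a t => simp

theorem pv_splitOn_eq (cs : List Char) : PySem.Chars.splitOn cs ['_'] = pvSp cs := by
  rw [PySem.Chars.splitOn, pv_go_eq (cs.length + 1) cs [] (by omega) _]
  · simp [pv_modifyHead_fun_id]

theorem pvSp_join (cs : List Char) : PySem.Chars.join ['_'] (pvSp cs) = cs := by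
  induction cs with
  | nil => simp [pvSp, PySem.Chars.join, List.intercalate]
  | cons c r ih =>
    by_cases hc : c = '_'
    · subst hc
      simp only [pvSp, if_true]
      obtain ⟨a, t, ht⟩ : ∃ a t, pvSp r = a :: t := by
        cases h : pvSp r with
        | nil => exact absurd h (pvSp_ne_nil r)
        | cons a t => exact ⟨a, t, rfl⟩
      rw [ht] at ih ⊢
      simp [PySem.Chars.join, List.intercalate] at ih ⊢
      simpa using ih
    · simp only [pvSp, if_neg hc]
      obtain ⟨a, t, ht⟩ : ∃ a t, pvSp r = a :: t := by
        cases h : pvSp r with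
        | nil => exact absurd h (pvSp_ne_nil r)
        | cons a t => exact ⟨a, t, rfl⟩
      rw [ht] at ih ⊢
      simp only [List.modifyHead_cons]
      cases t with
      | nil => simp_all [PySem.Chars.join, List.intercalate]
      | cons b t2 => simp_all [PySem.Chars.join, List.intercalate]

theorem pvSp_not_mem (cs : List Char) (h : '_' ∉ cs) : pvSp cs = [cs] := by
  induction cs with
  | nil => rfl
  | cons c r ih =>
    simp only [List.mem_cons, not_or] at h
    simp [pvSp, Ne.symm h.1, ih h.2]

theorem pvSp_split (pre post : List Char) (h : '_' ∉ pre) :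
    PySem.Chars.join ['_'] ((pvSp (pre ++ '_' :: post)).tail) = post := by
  induction pre with
  | nil => simp [pvSp, pvSp_join]
  | cons c pre ih =>
    simp only [List.mem_cons, not_or] at h
    simp only [List.cons_append, pvSp, if_neg (Ne.symm h.1 : ¬ c = '_')]
    rw [List.tail_modifyHead]
    exact ih h.2

theorem pv_foldF (part : List String) (k : Nat) (hk : (k : Int) ≤ (part.length : Int) - 1) :
    (PySem.List.pyRange 0 (k : Int) 1).foldl
      (fun name x =>
        if x = 0 then name
        else if x = (part.length : Int) - 1 then name ++ [PySem.List.pyGetD part x ""]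
        else name ++ [PySem.List.pyGetD part x "" ++ "_"]) []
    = ((part.take k).drop 1).map (· ++ "_") := by
  induction k with
  | zero => simp [PySem.List.pyRange_one_eq_nil]
  | succ m ih =>
    rw [show ((m + 1 : Nat) : Int) = (m : Int) + 1 by push_cast; ring,
      PySem.List.pyRange_one_succ_right (by positivity), List.foldl_append]
    rw [ih (by push_cast at hk ⊢; omega)]
    simp only [List.foldl_cons, List.foldl_nil]
    by_cases hm : m = 0
    · subst hm; simp
    · have h0 : ((m : Int) ≠ 0) := by exact_mod_cast hm
      have hne : (m : Int) ≠ (part.length : Int) - 1 := by push_cast at hk ⊢; omega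
      have hmlt : m < part.length := by push_cast at hk; omega
      rw [if_neg h0, if_neg hne]
      rw [PySem.List.pyGetD_natCast, List.take_add_one]
      rw [List.drop_append_of_le_length (by simp [List.length_take]; omega)]
      simp [List.getElem?_eq_getElem hmlt]

theorem pv_intercalate_cons₂ (sep a b : List Char) (t : List (List Char)) :
    List.intercalate sep (a :: b :: t) = a ++ sep ++ List.intercalate sep (b :: t) := by
  simp [List.intercalate]

theorem pv_join_marks (q : List (List Char)) (l : List Char) :
    PySem.Chars.join [] (q.map (· ++ ['_']) ++ [l]) = PySem.Chars.join ['_'] (q ++ [l]) := by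
  induction q with
  | nil => simp [PySem.Chars.join, List.intercalate]
  | cons a q ih =>
    cases q with
    | nil =>
      simp only [PySem.Chars.join, List.map_cons, List.map_nil, List.nil_append,
        List.cons_append] at ih ⊢
      rw [pv_intercalate_cons₂, pv_intercalate_cons₂]
      simp [ih]
    | cons b t =>
      simp only [PySem.Chars.join, List.map_cons, List.cons_append] at ih ⊢
      rw [pv_intercalate_cons₂, pv_intercalate_cons₂]
      simp [ih]


theorem pv_singleton_infix_of_mem {c : Char} {cs : List Char} (h : c ∈ cs) : [c] <:+: cs := by
  obtain ⟨s, t, rfl⟩ := List.append_of_mem h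
  exact ⟨s, t, by simp⟩

theorem pv_joinA (cs : List Char) :
    PySem.Str.join "_" (((pvSp cs).map String.ofList).drop 1)
      = String.ofList (PySem.Chars.join ['_'] ((pvSp cs).tail)) := by
  simp [PySem.Str.join, List.map_map, Function.comp_def, List.drop_one]

theorem pv_join_marks_str (q : List String) (l : String) :
    PySem.Str.join "" (q.map (· ++ "_") ++ [l]) = PySem.Str.join "_" (q ++ [l]) := by
  simp only [PySem.Str.join]
  congr 1
  have h := pv_join_marks (q.map String.toList) l.toList
  simpa [List.map_map, Function.comp_def, String.toList_append] using h

theorem pv_A_eq_join (key : String) :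
    get_marker_name key = PySem.Str.join "_" (((pvSp key.toList).map String.ofList).drop 1) := by
  have hpart : (PySem.Str.split? key "_").getD []
      = (pvSp key.toList).map String.ofList := by
    simp [PySem.Str.split?, PySem.Chars.split?, pv_splitOn_eq]
  unfold get_marker_name
  simp only [hpart]
  set part : List String := (pvSp key.toList).map String.ofList with hpartdef
  have hlen : part.length = (pvSp key.toList).length := by simp [hpartdef]
  obtain ⟨m, hm⟩ : ∃ m, part.length = m + 1 := by
    cases h : pvSp key.toList with
    | nil => exact absurd h (pvSp_ne_nil _)
    | cons a t => exact ⟨t.length, by simp [hlen, h]⟩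
  rw [hm]
  rw [show ((m + 1 : Nat) : Int) = (m : Int) + 1 by push_cast; ring,
    PySem.List.pyRange_one_succ_right (by positivity), List.foldl_append]
  have hF := pv_foldF part m (by rw [hm]; push_cast; omega)
  rw [hm, show ((m + 1 : Nat) : Int) = (m : Int) + 1 by push_cast; ring] at hF
  rw [hF]
  simp only [List.foldl_cons, List.foldl_nil]
  by_cases hm0 : m = 0
  · subst hm0
    have hpart1 : part.drop 1 = [] := by
      rw [List.drop_eq_nil_iff, hm]
    simp [hpart1, PySem.Str.join, PySem.Chars.join, List.intercalate]
  · have h0 : ((m : Int) ≠ 0) := by exact_mod_cast hm0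
    have hmlt : m < part.length := by omega
    rw [if_neg h0, if_pos (by ring)]
    rw [PySem.List.pyGetD_natCast, List.getD_eq_getElem _ _ hmlt]
    have hsplit : part = part.take m ++ [part[m]] := by
      conv_lhs => rw [← List.take_of_length_le (le_of_eq hm)]
      rw [List.take_add_one]
      simp [List.getElem?_eq_getElem hmlt]
    have hdecomp : part.drop 1 = (part.take m).drop 1 ++ [part[m]] := by
      conv_lhs => rw [hsplit]
      rw [List.drop_append_of_le_length (by simp [List.length_take]; omega)]
    rw [hdecomp, ← pv_join_marks_str]


theorem pv_mem_of_singleton_infix {c : Char} {cs : List Char} (h : [c] <:+: cs) : c ∈ cs := by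
  obtain ⟨s, t, rfl⟩ := h
  simp

-- ===== VERDICT (by name: the statement is the Claim_ definition above) =====
theorem get_marker_name_spec : Claim_equal_get_marker_name := by
  intro key _
  unfold Spec_get_marker_name
  rw [pv_A_eq_join, pv_joinA]
  unfold get_marker_name_alt
  rw [PySem.Str.find_eq]
  have hul : ("_" : String).toList = ['_'] := by simp
  rw [hul]
  by_cases hmem : '_' ∈ key.toList
  · have hinf : ['_'] <:+: key.toList := pv_singleton_infix_of_mem hmem
    have hpos : 0 ≤ PySem.Chars.find key.toList ['_'] := (PySem.Chars.find_nonneg_iff _ _).mpr hinf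
    have hspec := PySem.Chars.find_spec hpos
    set i := PySem.Chars.find key.toList ['_'] with hi
    have hne : ¬ i = -1 := by omega
    rw [if_neg hne]
    obtain ⟨t, ht⟩ := hspec.1
    have hk : key.toList.drop i.toNat = '_' :: key.toList.drop (i.toNat + 1) := by
      rw [← List.tail_drop, ← ht]
      simp
    have hdec : key.toList = key.toList.take i.toNat ++ '_' :: key.toList.drop (i.toNat + 1) := by
      rw [← hk, List.take_append_drop]
    have hnot : '_' ∉ key.toList.take i.toNat := by
      intro hc
      obtain ⟨j, hj, hget⟩ := List.getElem_of_mem hc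
      have hjlt : j < i.toNat := lt_of_lt_of_le hj (by simp [List.length_take])
      have hjlen : j < key.toList.length := by
        have h := hj
        rw [List.length_take] at h
        omega
      refine hspec.2 j hjlt ⟨key.toList.drop (j + 1), ?_⟩
      rw [List.getElem_take] at hget
      rw [← List.tail_drop]
      have hdj : key.toList.drop j = key.toList[j] :: (key.toList.drop j).tail := by
        rw [List.tail_drop, ← List.getElem_cons_drop hjlen]
      rw [hdj, hget]
      simp
    have hslice : PySem.Str.slice key (some (i + 1)) none
        = String.ofList (key.toList.drop (i.toNat + 1)) := by
      have h1 : (0:Int) ≤ i + 1 := by omega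
      have h2 : (i + 1).toNat = i.toNat + 1 := by omega
      rw [PySem.Str.slice]
      rw [show PySem.Chars.slice key.toList (some (i + 1)) none
            = key.toList.drop (i + 1).toNat from PySem.List.slice_from _ h1, h2]
    rw [hslice]
    congr 1
    conv_lhs => rw [hdec]
    exact pvSp_split _ _ hnot
  · have hninf : ¬ ['_'] <:+: key.toList := fun h => hmem (pv_mem_of_singleton_infix h)
    have hfind : PySem.Chars.find key.toList ['_'] = -1 :=
      (PySem.Chars.find_eq_neg_one_iff _ _).mpr hninf
    rw [hfind, if_pos rfl]
    rw [pvSp_not_mem _ hmem]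
    simp [PySem.Chars.join, List.intercalate]
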